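-- pv_equiv track=rewrite | github.com/StudyXTeam23/Scientific-Calculator | backend/app/services/calculation.py | format_expression
-- ===== SOURCE A (Python) =====
-- def format_expression(expression: str, angle_mode: str) -> str:
--     """
--     Format expression for display (add units, symbols, etc.)
--
--     Args:
--         expression: Original expression
--         angle_mode: Angle mode
--
--     Returns:
--         Formatted expression with units
--     """
--     formatted = expression
--
--     # Replace symbols for display
--     replacements = {
--         '*': '×',
--         '/': '÷',
--         'pi': 'π',
--         '**': '^',
--     }
--
--     for old, new in replacements.items():
--         formatted = formatted.replace(old, new)
--
--     # Add degree symbol if in deg mode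
--     if angle_mode == 'deg':
--         # Simple addition of degree symbol
--         # In a more robust implementation, we'd parse and add it correctly
--         pass
--
--     return formatted
-- ===== SOURCE B (Python) =====
-- def format_expression(expression: str, angle_mode: str) -> str:
--     """Single left-to-right scan with a lookup table instead of four full-string replace passes."""
--     table = {'*': '\u00d7', '/': '\u00f7'}
--     out = []
--     i = 0
--     n = len(expression)
--     while i < n:
--         if expression.startswith('pi', i):
--             out.append('\u03c0')
--             i += 2
--         else:
--             c = expression[i]
--             out.append(table.get(c, c))
--             i += 1
--     return ''.join(out)
-- ===== Notes on version B (the rewrite author's own statement) =====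
-- stated objective: idiomatic
-- what changed: Replaces four sequential full-string replace passes (including the dead '**' pass) with a single left-to-right scan driven by a lookup table that emits pi/times/divide substitutions in one traversal.
import Mathlib
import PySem

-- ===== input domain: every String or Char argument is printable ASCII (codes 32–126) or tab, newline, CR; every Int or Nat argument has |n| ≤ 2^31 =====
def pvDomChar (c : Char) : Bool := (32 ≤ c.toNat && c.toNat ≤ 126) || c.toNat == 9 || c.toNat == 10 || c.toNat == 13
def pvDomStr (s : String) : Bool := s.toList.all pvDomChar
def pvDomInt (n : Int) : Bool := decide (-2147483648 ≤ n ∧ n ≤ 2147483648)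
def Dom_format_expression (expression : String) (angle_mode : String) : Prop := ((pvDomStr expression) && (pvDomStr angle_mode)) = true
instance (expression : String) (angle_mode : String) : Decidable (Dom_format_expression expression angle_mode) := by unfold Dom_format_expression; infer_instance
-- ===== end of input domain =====

-- B replaces A's four sequential full-string replace passes by one table-driven left-to-right scan (idiomatic; same result).

-- ===== PORT A =====
-- A iterates over the dict's items in insertion order, applying str.replace each time;
-- the `angle_mode == 'deg'` branch is a `pass` and is ported as the no-op it is.
def format_expression (expression : String) (angle_mode : String) : String :=
  let replacements : List (String × String) :=
    [("*", "×"), ("/", "÷"), ("pi", "π"), ("**", "^")]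
  let formatted :=
    replacements.foldl (fun f p => PySem.Str.replace f p.1 p.2) expression
  formatted

-- ===== PORT B =====
-- table.get(c, c)
def fmtTable : PySem.Dict Char Char :=
  (PySem.Dict.empty.insert '*' '×').insert '/' '÷'

-- the single left-to-right scan of Source B: try 'pi' at the current position, else one char via the table
def fmtScan : List Char → List Char
  | 'p' :: 'i' :: t => 'π' :: fmtScan t
  | c :: t => fmtTable.getD c c :: fmtScan t
  | [] => []

def format_expression_alt (expression : String) (angle_mode : String) : String :=
  String.ofList (fmtScan expression.toList)

-- ===== PRECONDITION & SPEC =====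
def Spec_format_expression (expression : String) (angle_mode : String) (out : String) : Prop := out = format_expression_alt expression angle_mode
instance (expression : String) (angle_mode : String) (out : String) : Decidable (Spec_format_expression expression angle_mode out) := by unfold Spec_format_expression; infer_instance

-- ===== CLAIM (what is proved, stated in full; the proofs are below) =====
def Claim_equal_format_expression : Prop := ∀ (expression : String) (angle_mode : String), Dom_format_expression expression angle_mode → Spec_format_expression expression angle_mode (format_expression expression angle_mode)

-- ===== LEMMAS AND PROOFS =====

-- the per-char substitution A's first two passes perform
def fmtChar (c : Char) : Char := if c = '*' then '×' else if c = '/' then '÷' else c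

theorem fmtTable_getD (c : Char) : fmtTable.getD c c = fmtChar c := by
  by_cases h1 : c = '*'
  · subst h1; decide
  · by_cases h2 : c = '/'
    · subst h2; decide
    · have e1 : (('*' : Char) == c) = false := beq_eq_false_iff_ne.mpr (Ne.symm h1)
      have e2 : (('/' : Char) == c) = false := beq_eq_false_iff_ne.mpr (Ne.symm h2)
      simp [fmtTable, fmtChar, PySem.Dict.getD, PySem.Dict.get?, PySem.Dict.insert,
        PySem.Dict.empty, PySem.Dict.contains, List.find?, e1, e2, h1, h2]

theorem fmtScan_cons_ne (c : Char) (t : List Char)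
    (h : ¬ (c = 'p' ∧ ∃ t', t = 'i' :: t')) :
    fmtScan (c :: t) = fmtTable.getD c c :: fmtScan t := by
  rw [fmtScan.eq_def]
  split
  · rename_i h2
    injection h2 with h3 h4
    exact absurd ⟨h3, ⟨_, h4⟩⟩ h
  · rename_i h2 h3
    injection h3 with h4 h5
    subst h4; subst h5; rfl
  · rename_i h2; exact absurd h2 (by simp)

-- a single-character replace is a map
theorem go_single (a b : Char) : ∀ (fuel : Nat) (s acc : List Char), s.length ≤ fuel →
    PySem.Chars.replace.go [a] [b] fuel s acc
      = acc.reverse ++ s.map (fun c => if c = a then b else c) := by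
  intro fuel
  induction fuel with
  | zero => intro s acc h; cases s with
    | nil => simp [PySem.Chars.replace.go]
    | cons c t => simp at h
  | succ n ih =>
    intro s acc h
    cases s with
    | nil => simp [PySem.Chars.replace.go]
    | cons c t =>
      simp only [PySem.Chars.replace.go]
      by_cases hc : c = a
      · subst hc
        have hp : List.isPrefixOf [c] (c :: t) = true := by simp [List.isPrefixOf]
        rw [if_pos hp]
        simp only [List.length_singleton, List.drop_succ_cons, List.drop_zero,
          List.reverse_singleton, List.singleton_append]
        rw [ih t (b :: acc) (by simp at h; omega)]
        simp
      · have hp : List.isPrefixOf [a] (c :: t) = false := by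
          simp [List.isPrefixOf]
          exact fun hac => hc hac.symm
        rw [if_neg (by simp [hp])]
        rw [ih t (c :: acc) (by simp at h; omega)]
        simp [hc]

theorem replace_single (a b : Char) (s : List Char) :
    PySem.Chars.replace s [a] [b] = s.map (fun c => if c = a then b else c) := by
  rw [PySem.Chars.replace, if_neg (by simp)]
  simpa using go_single a b s.length s [] le_rfl

-- the tail case of the 'pi' pass on a one-element remainder, any fuel
theorem go_pi_one (x : Char) (acc : List Char) : ∀ fuel,
    PySem.Chars.replace.go ['p','i'] ['π'] fuel [x] acc = acc.reverse ++ [x] := by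
  intro fuel
  cases fuel with
  | zero => simp [PySem.Chars.replace.go]
  | succ n =>
    simp only [PySem.Chars.replace.go]
    have hp : List.isPrefixOf ['p','i'] [x] = false := by
      cases hx : List.isPrefixOf ['p','i'] [x]
      · rfl
      · simp [List.isPrefixOf] at hx
    rw [if_neg (by simp [hp])]
    cases n <;> simp [PySem.Chars.replace.go]

theorem fmtChar_eq_p {c : Char} (h : fmtChar c = 'p') : c = 'p' := by
  by_cases h1 : c = '*'
  · simp [fmtChar, h1] at h
  · by_cases h2 : c = '/'
    · simp [fmtChar, h2] at h
    · simpa [fmtChar, h1, h2] using h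

theorem fmtChar_eq_i {c : Char} (h : fmtChar c = 'i') : c = 'i' := by
  by_cases h1 : c = '*'
  · simp [fmtChar, h1] at h
  · by_cases h2 : c = '/'
    · simp [fmtChar, h2] at h
    · simpa [fmtChar, h1, h2] using h

-- 'pi' → 'π' on the fmtChar-mapped list computes exactly the single scan fmtScan
theorem go_pi : ∀ (fuel : Nat) (l acc : List Char), l.length ≤ fuel →
    PySem.Chars.replace.go ['p','i'] ['π'] fuel (l.map fmtChar) acc
      = acc.reverse ++ fmtScan l := by
  intro fuel
  induction fuel with
  | zero => intro l acc h; cases l with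
    | nil => simp [PySem.Chars.replace.go, fmtScan]
    | cons c t => simp at h
  | succ n ih =>
    intro l acc h
    match l with
    | [] => simp [PySem.Chars.replace.go, fmtScan]
    | [c] =>
      simp only [List.map]
      rw [go_pi_one]
      have hsc : fmtScan [c] = [fmtTable.getD c c] := by
        rw [fmtScan_cons_ne c [] (by simp)]; rfl
      simp [hsc, fmtTable_getD, fmtChar]
    | c :: d :: t =>
      have hlen : t.length ≤ n := by simp at h; omega
      simp only [List.map]
      simp only [PySem.Chars.replace.go]
      by_cases hpi : c = 'p' ∧ d = 'i'
      · obtain ⟨hc, hd⟩ := hpi; subst hc; subst hd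
        have hp : List.isPrefixOf ['p','i'] (fmtChar 'p' :: fmtChar 'i' :: t.map fmtChar) = true := by
          simp [List.isPrefixOf, fmtChar]
        rw [if_pos hp]
        have hdrop : List.drop ([('p' : Char),'i'].length)
            (fmtChar 'p' :: fmtChar 'i' :: t.map fmtChar) = t.map fmtChar := by simp
        rw [hdrop, ih t _ hlen]
        have hsc : fmtScan ('p' :: 'i' :: t) = 'π' :: fmtScan t := by simp [fmtScan]
        simp [hsc]
      · have hp : List.isPrefixOf ['p','i'] (fmtChar c :: fmtChar d :: t.map fmtChar) = false := by
          cases hx : List.isPrefixOf ['p','i'] (fmtChar c :: fmtChar d :: t.map fmtChar)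
          · rfl
          · simp [List.isPrefixOf] at hx
            exact absurd ⟨fmtChar_eq_p hx.1.symm, fmtChar_eq_i hx.2.symm⟩ hpi
        rw [if_neg (by simp [hp])]
        have hlen2 : (d :: t).length ≤ n := by simp at h ⊢; omega
        have hrec := ih (d :: t) (fmtChar c :: acc) hlen2
        simp only [List.map] at hrec
        rw [hrec]
        have hsc : fmtScan (c :: d :: t) = fmtTable.getD c c :: fmtScan (d :: t) := by
          apply fmtScan_cons_ne
          rintro ⟨hc, t', ht'⟩
          injection ht' with hd _
          exact hpi ⟨hc, hd⟩
        simp [hsc, fmtTable_getD]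

-- fmtScan never emits '*', so A's last ('**' → '^') pass is the identity
theorem star_not_mem_fmtScan : ∀ l : List Char, '*' ∉ fmtScan l := by
  intro l
  induction l using fmtScan.induct with
  | case1 t ih => simp [fmtScan]; exact ih
  | case2 c t h1 ih =>
      rw [fmtScan_cons_ne c t (by
        rintro ⟨hc, t', ht'⟩
        exact h1 t' hc ht')]
      intro hmem
      rcases List.mem_cons.mp hmem with hhd | htl
      · rw [fmtTable_getD] at hhd
        by_cases h1' : c = '*'
        · simp [fmtChar, h1'] at hhd
        · by_cases h2' : c = '/'
          · simp [fmtChar, h2'] at hhd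
          · rw [fmtChar, if_neg h1', if_neg h2'] at hhd
            exact h1' hhd.symm
      · exact ih htl
  | case3 => simp [fmtScan]

theorem go_star_absent (new : List Char) : ∀ (fuel : Nat) (s acc : List Char), '*' ∉ s →
    PySem.Chars.replace.go ['*','*'] new fuel s acc = acc.reverse ++ s := by
  intro fuel
  induction fuel with
  | zero => intro s acc h; cases s <;> simp [PySem.Chars.replace.go]
  | succ n ih =>
    intro s acc h
    cases s with
    | nil => simp [PySem.Chars.replace.go]
    | cons c t =>
      have hc : c ≠ '*' := fun hc => h (by simp [hc])
      simp only [PySem.Chars.replace.go]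
      have hp : List.isPrefixOf ['*','*'] (c :: t) = false := by
        cases hx : List.isPrefixOf ['*','*'] (c :: t)
        · rfl
        · simp [List.isPrefixOf] at hx
          exact absurd hx.1.symm hc
      rw [if_neg (by simp [hp])]
      rw [ih t (c :: acc) (fun ht => h (by simp [ht]))]
      simp

theorem replace_star_star (new s : List Char) (h : '*' ∉ s) :
    PySem.Chars.replace s ['*','*'] new = s := by
  rw [PySem.Chars.replace, if_neg (by simp)]
  simpa using go_star_absent new s.length s [] h

theorem replace_pi (l : List Char) :
    PySem.Chars.replace (l.map fmtChar) ['p','i'] ['π'] = fmtScan l := by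
  rw [PySem.Chars.replace, if_neg (by simp)]
  simpa using go_pi (l.map fmtChar).length l [] (by simp)

theorem chars_main (l : List Char) :
    PySem.Chars.replace
      (PySem.Chars.replace
        (PySem.Chars.replace (PySem.Chars.replace l ['*'] ['×']) ['/'] ['÷'])
        ['p','i'] ['π'])
      ['*','*'] ['^'] = fmtScan l := by
  rw [replace_single, replace_single, List.map_map]
  have hmap : ((fun c => if c = '/' then '÷' else c) ∘ fun c => if c = '*' then '×' else c)
      = fmtChar := by
    funext c
    by_cases h1 : c = '*' <;> by_cases h2 : c = '/' <;> simp_all [fmtChar]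
  rw [hmap, replace_pi]
  exact replace_star_star _ _ (star_not_mem_fmtScan l)

-- ===== VERDICT (by name: the statement is the Claim_ definition above) =====
theorem format_expression_spec : Claim_equal_format_expression := by
  intro expression angle_mode _
  unfold Spec_format_expression format_expression format_expression_alt
  simp only [List.foldl]
  apply String.toList_inj.mp
  simp only [PySem.Str.toList_replace, String.toList_ofList]
  have := chars_main expression.toList
  convert this using 3 <;> rfl
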